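-- pv_equiv track=rewrite | github.com/RickyL-2000/ZJUI-lib | ECE365/Genomics/lab1/main.py | parse_reads_pac
-- ===== SOURCE A (Python) =====
-- def parse_reads_pac(reads_pac: str):
--     '''
--     Input - pac bio reads file as a string
--     Output - list of dna reads
--     '''
--     #start code here
--     lines = reads_pac.split('\n')
--     ret = []
--     cur_dna = ''
--     for line in lines:
--         if len(line) == 0:
--             continue
--         if line[0] == '>' and cur_dna != '':
--             ret.append(cur_dna)
--             cur_dna = ''
--             continue
--         if line[0] != '>':
--             cur_dna = cur_dna + line
--     if cur_dna != '':
--         ret.append(cur_dna)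
--     return ret
-- ===== SOURCE B (Python) =====
-- def parse_reads_pac(reads_pac: str):
--     # Grouping decomposition: drop empty lines, then walk runs of consecutive
--     # sequence lines (span until next '>' header) and join each run into one read.
--     lines = [l for l in reads_pac.split('\n') if l]
--     reads = []
--     n = len(lines)
--     i = 0
--     while i < n:
--         if lines[i].startswith('>'):
--             i += 1
--         else:
--             j = i
--             while j < n and not lines[j].startswith('>'):
--                 j += 1
--             reads.append(''.join(lines[i:j]))
--             i = j
--     return reads
-- ===== Notes on version B (the rewrite author's own statement) =====
-- stated objective: alternative
-- what changed: Replaces A's per-line accumulator state machine (cur_dna carried across iterations with flush-on-header and flush-at-end) by a filter-then-group decomposition: drop empty lines first, then walk maximal runs of consecutive non-header lines and join each run into one read.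
import Mathlib
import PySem

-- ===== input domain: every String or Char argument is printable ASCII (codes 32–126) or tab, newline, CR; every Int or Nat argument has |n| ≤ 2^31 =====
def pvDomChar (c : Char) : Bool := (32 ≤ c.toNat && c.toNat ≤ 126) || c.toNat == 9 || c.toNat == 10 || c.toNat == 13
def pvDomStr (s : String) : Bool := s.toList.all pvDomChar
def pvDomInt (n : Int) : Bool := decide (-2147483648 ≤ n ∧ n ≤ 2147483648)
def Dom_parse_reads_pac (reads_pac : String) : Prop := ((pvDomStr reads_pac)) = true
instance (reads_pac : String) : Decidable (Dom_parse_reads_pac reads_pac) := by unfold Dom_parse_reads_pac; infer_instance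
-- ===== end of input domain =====

-- B replaces A's per-line accumulator state machine by a filter-then-group decomposition
-- (drop empty lines, then join each maximal run of non-header lines); objective: alternative.

-- ===== PORT A =====
-- one iteration of A's for-loop over (ret, cur_dna)
def pvStepA (st : List String × String) (line : String) : List String × String :=
  if PySem.Str.len line == 0 then st
  else if PySem.Str.pyGet? line 0 == some '>' && !(st.2 == "") then (st.1 ++ [st.2], "")
  else if !(PySem.Str.pyGet? line 0 == some '>') then (st.1, st.2 ++ line)
  else st

-- A's trailing `if cur_dna != '': ret.append(cur_dna)`
def pvFinishA (st : List String × String) : List String :=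
  if !(st.2 == "") then st.1 ++ [st.2] else st.1

def parse_reads_pac (reads_pac : String) : List String :=
  -- split? is always `some` here since the separator "\n" is nonempty
  let lines := (PySem.Str.split? reads_pac "\n").getD []
  pvFinishA (lines.foldl pvStepA ([], ""))

-- ===== PORT B =====
-- `not lines[j].startswith('>')` : j is a sequence line
def pvIsSeqB (l : String) : Bool := !(PySem.Str.startswith l ">")

-- Source B's outer while-loop: skip a header, or join the maximal run of sequence lines
def pvGoB : List String → List String
  | [] => []
  | l :: ls =>
    if PySem.Str.startswith l ">" then pvGoB ls
    else PySem.Str.join "" (l :: ls.takeWhile pvIsSeqB) :: pvGoB (ls.dropWhile pvIsSeqB)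
termination_by ls => ls.length
decreasing_by
  · simp
  · exact Nat.lt_succ_of_le (List.length_dropWhile_le _ _)

def parse_reads_pac_alt (reads_pac : String) : List String :=
  -- split? is always `some` here since the separator "\n" is nonempty
  let lines := ((PySem.Str.split? reads_pac "\n").getD []).filter (fun l => l != "")
  pvGoB lines

-- ===== PRECONDITION & SPEC =====
def Spec_parse_reads_pac (reads_pac : String) (out : List String) : Prop := out = parse_reads_pac_alt reads_pac
instance (reads_pac : String) (out : List String) : Decidable (Spec_parse_reads_pac reads_pac out) := by unfold Spec_parse_reads_pac; infer_instance

-- ===== CLAIM (what is proved, stated in full; the proofs are below) =====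
def Claim_equal_parse_reads_pac : Prop := ∀ (reads_pac : String), Dom_parse_reads_pac reads_pac → Spec_parse_reads_pac reads_pac (parse_reads_pac reads_pac)

-- ===== LEMMAS AND PROOFS =====

-- A's loop, restructured as a recursion over the remaining lines (proof bridge)
def pvRun (cur : String) : List String → List String
  | [] => if cur == "" then [] else [cur]
  | l :: ls =>
      if PySem.Str.pyGet? l 0 == some '>' then
        (if cur == "" then [] else [cur]) ++ pvRun "" ls
      else pvRun (cur ++ l) ls

lemma pv_ne_empty_iff (l : String) : (l ≠ "") ↔ l.toList ≠ [] := by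
  constructor
  · intro h hc; exact h (String.toList_eq_nil_iff.mp hc)
  · intro h hc; exact h (by simp [hc])

lemma pv_append_ne_empty (cur l : String) (h : l ≠ "") : cur ++ l ≠ "" := by
  rw [pv_ne_empty_iff] at h ⊢
  simp [String.toList_append, List.append_eq_nil_iff]
  exact fun _ hc => h (by simp [hc])

lemma pv_hdr_iff (l : String) (hl : l ≠ "") :
    (PySem.List.pyGet? l.toList 0 = some '>') ↔ PySem.Chars.startswith l.toList ['>'] = true := by
  obtain ⟨c, cs, hc⟩ := List.exists_cons_of_ne_nil ((pv_ne_empty_iff l).mp hl)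
  rw [hc]
  simp [PySem.List.pyGet?, PySem.List.pyIdx?, PySem.Chars.startswith]
  exact eq_comm

lemma pv_join_cons (x : String) (xs : List String) :
    PySem.Str.join "" (x :: xs) = x ++ PySem.Str.join "" xs := by
  have h : ∀ (cs : List Char) (ys : List (List Char)),
      ([] : List Char).intercalate (cs :: ys) = cs ++ ([] : List Char).intercalate ys := by
    intro cs ys; cases ys <;> simp [List.intercalate, List.intersperse]
  apply String.toList_injective
  simp [PySem.Str.join, PySem.Chars.join, h, String.toList_append]

-- A ignores empty lines: folding over all lines = folding over the nonempty ones
lemma pv_fold_filter (ls : List String) (st : List String × String) :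
    ls.foldl pvStepA st = (ls.filter (fun l => l != "")).foldl pvStepA st := by
  induction ls generalizing st with
  | nil => rfl
  | cons l ls ih =>
    by_cases h : l = ""
    · subst h
      simpa [pvStepA] using ih st
    · simp [h, List.foldl_cons]
      exact ih _

-- the fold + trailing flush computes pvRun
lemma pv_fold_run (ls : List String) (h : ∀ l ∈ ls, l ≠ "") :
    ∀ acc cur, pvFinishA (ls.foldl pvStepA (acc, cur)) = acc ++ pvRun cur ls := by
  induction ls with
  | nil =>
    intro acc cur
    by_cases hc : cur = "" <;> simp [pvFinishA, pvRun, hc]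
  | cons l ls ih =>
    intro acc cur
    have hl : l ≠ "" := h l (List.mem_cons_self ..)
    have hrest : ∀ x ∈ ls, x ≠ "" := fun x hx => h x (List.mem_cons_of_mem _ hx)
    rw [List.foldl_cons]
    by_cases hh : PySem.List.pyGet? l.toList 0 = some '>'
    · by_cases hc : cur = ""
      · simp [pvStepA, hl, hh, hc, pvRun, ih hrest]
      · simp [pvStepA, hl, hh, hc, pvRun, ih hrest]
    · simp [pvStepA, hl, hh, pvRun, ih hrest]

-- pvRun computes B's grouping recursion
lemma pv_run_go (ls : List String) (h : ∀ l ∈ ls, l ≠ "") :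
    pvRun "" ls = pvGoB ls ∧
    (∀ cur, cur ≠ "" →
      pvRun cur ls =
        (cur ++ PySem.Str.join "" (ls.takeWhile pvIsSeqB)) :: pvGoB (ls.dropWhile pvIsSeqB)) := by
  induction ls with
  | nil =>
    constructor
    · simp [pvRun, pvGoB]
    · intro cur hc
      simp [pvRun, hc, pvGoB, PySem.Str.join, PySem.Chars.join, List.intercalate]
  | cons l ls ih =>
    have hl : l ≠ "" := h l (List.mem_cons_self ..)
    have hrest : ∀ x ∈ ls, x ≠ "" := fun x hx => h x (List.mem_cons_of_mem _ hx)
    obtain ⟨iha, ihb⟩ := ih hrest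
    by_cases hh : PySem.List.pyGet? l.toList 0 = some '>'
    · have hsw : PySem.Chars.startswith l.toList ['>'] = true := (pv_hdr_iff l hl).mp hh
      have hseqF : pvIsSeqB l = false := by simp [pvIsSeqB, hsw]
      constructor
      · simp [pvRun, hh, iha, pvGoB, hsw]
      · intro cur hc
        simp [pvRun, hh, hc, iha, hseqF,
          pvGoB, hsw, PySem.Str.join, PySem.Chars.join, List.intercalate]
    · have hsw : PySem.Chars.startswith l.toList ['>'] = false := by
        rcases Bool.eq_false_or_eq_true (PySem.Chars.startswith l.toList ['>']) with hb | hb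
        · exact absurd ((pv_hdr_iff l hl).mpr hb) hh
        · exact hb
      have hseq : pvIsSeqB l = true := by simp [pvIsSeqB, hsw]
      have key : ∀ cur, pvRun (cur ++ l) ls =
          (cur ++ PySem.Str.join "" (l :: ls.takeWhile pvIsSeqB)) ::
            pvGoB (ls.dropWhile pvIsSeqB) := by
        intro cur
        rw [ihb (cur ++ l) (pv_append_ne_empty cur l hl), pv_join_cons, ← String.append_assoc]
      constructor
      · have hk := key ""
        simp only [String.empty_append] at hk
        simp [pvRun, hh, pvGoB, hsw, hk]
      · intro cur hc
        simp only [pvRun, List.takeWhile_cons, List.dropWhile_cons, hseq, if_true]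
        simp only [PySem.Str.pyGet?_eq, PySem.Chars.pyGet?_eq_listPyGet?]
        rw [if_neg (by simpa using hh)]
        exact key cur

-- ===== VERDICT (by name: the statement is the Claim_ definition above) =====
theorem parse_reads_pac_spec : Claim_equal_parse_reads_pac := by
  intro s _
  unfold Spec_parse_reads_pac parse_reads_pac parse_reads_pac_alt
  show pvFinishA (((PySem.Str.split? s "\n").getD []).foldl pvStepA ([], "")) =
    pvGoB (((PySem.Str.split? s "\n").getD []).filter (fun l => l != ""))
  have hne : ∀ l ∈ ((PySem.Str.split? s "\n").getD []).filter (fun l => l != ""), l ≠ "" := by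
    intro l hl
    simpa using List.of_mem_filter hl
  rw [pv_fold_filter, pv_fold_run _ hne [] ""]
  simpa using (pv_run_go _ hne).1
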